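-- pv_equiv track=rewrite | github.com/binomaiheu/nibterm | src/nibterm/ui/clickable_display.py | build_csv_column_ranges
-- ===== SOURCE A (Python) =====
-- def build_csv_column_ranges(
--     line: str, delimiter: str
-- ) -> list[tuple[int, int, str, str]]:
--     """Return (start, end, path, key_name) for each CSV column for click-to-add.
--
--     path is \"__column_0\", \"__column_1\", ... so the callback can add by column index.
--     """
--     if not delimiter:
--         delimiter = ","
--     ranges: list[tuple[int, int, str, str]] = []
--     pos = 0
--     col = 0
--     while True:
--         next_delim = line.find(delimiter, pos)
--         if next_delim == -1:
--             key = line[pos:].strip() or f"col{col}"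
--             ranges.append((pos, len(line), f"__column_{col}", key))
--             break
--         key = line[pos:next_delim].strip() or f"col{col}"
--         ranges.append((pos, next_delim, f"__column_{col}", key))
--         col += 1
--         pos = next_delim + len(delimiter)
--     return ranges
-- ===== SOURCE B (Python) =====
-- def build_csv_column_ranges(
--     line: str, delimiter: str
-- ) -> list[tuple[int, int, str, str]]:
--     """Split once, then assign character offsets in a single enumerate pass."""
--     if not delimiter:
--         delimiter = ","
--     ranges: list[tuple[int, int, str, str]] = []
--     start = 0
--     for i, part in enumerate(line.split(delimiter)):
--         ranges.append((start, start + len(part), f"__column_{i}", part.strip() or f"col{i}"))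
--         start += len(part) + len(delimiter)
--     return ranges
-- ===== Notes on version B (the rewrite author's own statement) =====
-- stated objective: simpler
-- what changed: A interleaves repeated line.find(delimiter, pos) scanning with emission in a while-loop over a pos/col cursor; B splits the line once with line.split(delimiter) and then assigns (start, end) offsets in a single enumerate pass with a running start accumulator.
import Mathlib
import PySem

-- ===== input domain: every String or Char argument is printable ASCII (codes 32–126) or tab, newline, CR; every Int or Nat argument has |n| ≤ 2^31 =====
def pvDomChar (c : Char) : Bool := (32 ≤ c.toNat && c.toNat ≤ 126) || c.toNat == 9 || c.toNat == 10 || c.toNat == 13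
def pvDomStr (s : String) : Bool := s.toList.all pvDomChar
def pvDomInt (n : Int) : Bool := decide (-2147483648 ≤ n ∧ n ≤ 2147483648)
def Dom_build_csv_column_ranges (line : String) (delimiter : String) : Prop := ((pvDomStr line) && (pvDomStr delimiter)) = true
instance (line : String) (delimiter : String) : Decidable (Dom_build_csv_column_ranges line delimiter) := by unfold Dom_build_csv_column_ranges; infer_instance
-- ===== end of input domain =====

-- B replaces A's interleaved find/emit while-loop by one split followed by a single
-- offset-accumulating enumerate pass (objective: simpler decomposition, same cost).

-- ===== PORT A =====
-- A's while-loop: pos/col state, line.find(delimiter, pos) each round; fuel only makes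
-- the same computation total (the loop runs at most len(line)+1 times).
def buildA (l sep : List Char) (fuel : Nat) (pos col : Nat) :
    List (Int × Int × String × String) :=
  match fuel with
  | 0 => []
  | fuel + 1 =>
    let nd := PySem.Chars.findFrom l sep ((pos : Int)) none
    if nd = -1 then
      let k := PySem.Chars.strip (PySem.List.slice l (some (pos : Int)) none)
      let key := if k = [] then "col" ++ PySem.Int.toStr (col : Int) else String.ofList k
      [((pos : Int), (l.length : Int), "__column_" ++ PySem.Int.toStr (col : Int), key)]
    else
      let k := PySem.Chars.strip (PySem.List.slice l (some (pos : Int)) (some nd))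
      let key := if k = [] then "col" ++ PySem.Int.toStr (col : Int) else String.ofList k
      ((pos : Int), nd, "__column_" ++ PySem.Int.toStr (col : Int), key)
        :: buildA l sep fuel (nd.toNat + sep.length) (col + 1)

def build_csv_column_ranges (line : String) (delimiter : String) :
    List (Int × Int × String × String) :=
  let delim := if delimiter = "" then "," else delimiter
  buildA line.toList delim.toList (line.toList.length + 1) 0 0

-- ===== PORT B =====
-- B's enumerate pass over the parts of line.split(delimiter), with a running start offset.
def buildB (sep : List Char) (parts : List (List Char)) (start i : Nat) :
    List (Int × Int × String × String) :=
  match parts with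
  | [] => []
  | p :: rest =>
    let k := PySem.Chars.strip p
    ((start : Int), ((start + p.length : Nat) : Int), "__column_" ++ PySem.Int.toStr (i : Int),
      if k = [] then "col" ++ PySem.Int.toStr (i : Int) else String.ofList k)
      :: buildB sep rest (start + p.length + sep.length) (i + 1)

def build_csv_column_ranges_alt (line : String) (delimiter : String) :
    List (Int × Int × String × String) :=
  let delim := if delimiter = "" then "," else delimiter
  buildB delim.toList (PySem.Chars.splitOn line.toList delim.toList) 0 0

-- ===== PRECONDITION & SPEC =====
def Spec_build_csv_column_ranges (line : String) (delimiter : String) (out : List (Int × Int × String × String)) : Prop := out = build_csv_column_ranges_alt line delimiter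
instance (line : String) (delimiter : String) (out : List (Int × Int × String × String)) : Decidable (Spec_build_csv_column_ranges line delimiter out) := by unfold Spec_build_csv_column_ranges; infer_instance

-- ===== CLAIM (what is proved, stated in full; the proofs are below) =====
def Claim_equal_build_csv_column_ranges : Prop := ∀ (line : String) (delimiter : String), Dom_build_csv_column_ranges line delimiter → Spec_build_csv_column_ranges line delimiter (build_csv_column_ranges line delimiter)

-- ===== LEMMAS AND PROOFS =====

-- prepend p to the first element of a list of parts
def prefixFirst (p : List Char) : List (List Char) → List (List Char)
  | [] => []
  | x :: xs => (p ++ x) :: xs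

theorem prefixFirst_nil (xs : List (List Char)) : prefixFirst [] xs = xs := by
  cases xs <;> simp [prefixFirst]

-- fuel-free recursive characterisation of Python split for a nonempty separator
def splitRec (sep : List Char) : List Char → List (List Char)
  | [] => [[]]
  | c :: rest =>
    if h3 : sep ≠ [] ∧ sep.isPrefixOf (c :: rest) then
      [] :: splitRec sep (List.drop sep.length (c :: rest))
    else
      prefixFirst [c] (splitRec sep rest)
termination_by l => l.length
decreasing_by
  · have h1 : 1 ≤ sep.length := by
      cases sep with
      | nil => exact absurd rfl h3.1
      | cons a t => simp
    simp only [List.length_drop, List.length_cons]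
    omega
  · simp

theorem splitRec_ne_nil (sep l : List Char) : splitRec sep l ≠ [] := by
  cases l with
  | nil => simp [splitRec]
  | cons c rest =>
    rw [splitRec]
    split
    · simp
    · cases hh : splitRec sep rest with
      | nil => exact absurd hh (splitRec_ne_nil sep rest)
      | cons x xs => simp [prefixFirst]

theorem go_eq (sep : List Char) (hs : sep ≠ []) :
    ∀ (fuel : Nat) (l cur : List Char) (acc : List (List Char)), l.length ≤ fuel →
      PySem.Chars.splitOn.go sep fuel l cur acc
        = acc.reverse ++ prefixFirst cur.reverse (splitRec sep l) := by
  intro fuel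
  induction fuel with
  | zero =>
    intro l cur acc hl
    have hl0 : l = [] := List.eq_nil_of_length_eq_zero (by omega)
    subst hl0
    show ((cur.reverse ++ []) :: acc).reverse = _
    simp [splitRec, prefixFirst]
  | succ f ih =>
    intro l cur acc hl
    cases l with
    | nil =>
      show (cur.reverse :: acc).reverse = _
      simp [splitRec, prefixFirst]
    | cons c rest =>
      have hsl : 1 ≤ sep.length := List.length_pos_of_ne_nil hs
      have hstep : PySem.Chars.splitOn.go sep (f + 1) (c :: rest) cur acc
          = if sep.isPrefixOf (c :: rest) then
              PySem.Chars.splitOn.go sep f (List.drop sep.length (c :: rest)) []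
                (cur.reverse :: acc)
            else PySem.Chars.splitOn.go sep f rest (c :: cur) acc := rfl
      rw [hstep]
      by_cases hp : sep.isPrefixOf (c :: rest)
      · rw [if_pos hp, ih _ _ _ (by simp only [List.length_drop, List.length_cons] at hl ⊢; omega)]
        conv_rhs => rw [splitRec]
        rw [dif_pos (⟨hs, hp⟩ : sep ≠ [] ∧ _), List.reverse_nil, prefixFirst_nil]
        simp [prefixFirst]
      · rw [if_neg hp, ih _ _ _ (by simp only [List.length_cons] at hl; omega)]
        conv_rhs => rw [splitRec]
        rw [dif_neg (by tauto)]
        cases hsp : splitRec sep rest with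
        | nil => exact absurd hsp (splitRec_ne_nil sep rest)
        | cons x xs => simp [prefixFirst]

theorem splitOn_eq_splitRec (s sep : List Char) (hs : sep ≠ []) :
    PySem.Chars.splitOn s sep = splitRec sep s := by
  show PySem.Chars.splitOn.go sep (s.length + 1) s [] [] = _
  rw [go_eq sep hs _ _ _ _ (by omega)]
  cases hsp : splitRec sep s with
  | nil => exact absurd hsp (splitRec_ne_nil sep s)
  | cons x xs => simp [prefixFirst]

theorem splitRec_of_not_infix (sep l : List Char) (h : ¬ sep <:+: l) :
    splitRec sep l = [l] := by
  induction l with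
  | nil => simp [splitRec]
  | cons c rest ih =>
    have hrest : ¬ sep <:+: rest := fun hin => h (hin.trans (List.suffix_cons c rest).isInfix)
    rw [splitRec, dif_neg (by
      rintro ⟨-, hp⟩
      exact h (List.isPrefixOf_iff_prefix.mp hp).isInfix), ih hrest]
    simp [prefixFirst]

theorem splitRec_of_first_prefix (sep : List Char) (hs : sep ≠ []) :
    ∀ (l : List Char) (k : Nat), sep <+: List.drop k l →
      (∀ i < k, ¬ sep <+: List.drop i l) →
      splitRec sep l = List.take k l :: splitRec sep (List.drop (k + sep.length) l) := by
  intro l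
  induction l with
  | nil =>
    intro k hpre _
    simp only [List.drop_nil] at hpre
    exact absurd (List.prefix_nil.mp hpre) hs
  | cons c rest ih =>
    intro k hpre hmin
    cases k with
    | zero =>
      simp only [List.drop_zero] at hpre
      rw [splitRec, dif_pos ⟨hs, List.isPrefixOf_iff_prefix.mpr hpre⟩]
      simp
    | succ j =>
      have hnp : ¬ sep <+: (c :: rest) := by
        have := hmin 0 (by omega)
        simpa using this
      rw [splitRec, dif_neg (by
        rintro ⟨-, hp⟩
        exact hnp (List.isPrefixOf_iff_prefix.mp hp))]
      rw [ih j (by simpa [List.drop_succ_cons] using hpre)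
        (fun i hi => by simpa [List.drop_succ_cons] using hmin (i + 1) (by omega))]
      have hdrop : List.drop (j + 1 + sep.length) (c :: rest) = List.drop (j + sep.length) rest := by
        rw [show j + 1 + sep.length = (j + sep.length) + 1 from by omega, List.drop_succ_cons]
      rw [hdrop]
      simp [prefixFirst, List.take_succ_cons]

theorem loop_eq (l sep : List Char) (hs : sep ≠ []) :
    ∀ (fuel pos col : Nat), pos ≤ l.length → l.length + 1 - pos ≤ fuel →
      buildA l sep fuel pos col = buildB sep (splitRec sep (List.drop pos l)) pos col := by
  intro fuel
  induction fuel with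
  | zero => intro pos col h1 h2; omega
  | succ f ih =>
    intro pos col h1 h2
    have hsl : 1 ≤ sep.length := List.length_pos_of_ne_nil hs
    simp only [buildA, PySem.Chars.findFrom_natCast l sep pos h1]
    by_cases hf : PySem.Chars.find (List.drop pos l) sep = -1
    · rw [if_pos hf, if_pos (rfl : (-1 : Int) = -1)]
      rw [splitRec_of_not_infix sep _ ((PySem.Chars.find_eq_neg_one_iff _ _).mp hf)]
      simp only [buildB, PySem.List.slice_from_natCast]
      rw [show ((pos + (List.drop pos l).length : Nat) : Int) = (l.length : Int) from by
        simp only [List.length_drop]; omega]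
    · have h0 : 0 ≤ PySem.Chars.find (List.drop pos l) sep := by
        have := PySem.Chars.neg_one_le_find (List.drop pos l) sep
        omega
      set k := (PySem.Chars.find (List.drop pos l) sep).toNat with hkdef
      have hk2 : PySem.Chars.find (List.drop pos l) sep = (k : Int) :=
        (Int.toNat_of_nonneg h0).symm
      obtain ⟨hpre, hmin⟩ := PySem.Chars.find_spec h0
      have hkle : k + sep.length ≤ (List.drop pos l).length := by
        have h3 := hpre.length_le
        simp only [List.length_drop] at h3
        by_cases hcase : k ≤ (List.drop pos l).length
        · simp only [List.length_drop] at *; omega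
        · exfalso
          have : List.drop k (List.drop pos l) = [] := by
            apply List.drop_eq_nil_of_le; omega
          rw [this] at hpre
          exact hs (List.prefix_nil.mp hpre)
      rw [if_neg hf, hk2]
      have hne : ((pos : Int) + (k : Int)) ≠ -1 := by omega
      rw [if_neg hne]
      rw [splitRec_of_first_prefix sep hs (List.drop pos l) k hpre hmin]
      simp only [buildB]
      have htoNat : ((pos : Int) + (k : Int)).toNat = pos + k := by omega
      have hlen2 : (List.take k (List.drop pos l)).length = k := by
        simp only [List.length_take, List.length_drop]
        simp only [List.length_drop] at hkle
        omega
      rw [htoNat, PySem.List.slice_natCast_add, hlen2]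
      have hdd : List.drop (k + sep.length) (List.drop pos l)
          = List.drop (pos + k + sep.length) l := by
        rw [List.drop_drop]
        congr 1
        omega
      rw [hdd, ih (pos + k + sep.length) (col + 1)
        (by simp only [List.length_drop] at hkle; omega)
        (by omega)]
      norm_cast

-- ===== VERDICT (by name: the statement is the Claim_ definition above) =====
theorem build_csv_column_ranges_spec : Claim_equal_build_csv_column_ranges := by
  intro line delimiter _
  show build_csv_column_ranges line delimiter = build_csv_column_ranges_alt line delimiter
  show buildA line.toList (if delimiter = "" then "," else delimiter).toList
      (line.toList.length + 1) 0 0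
    = buildB (if delimiter = "" then "," else delimiter).toList
      (PySem.Chars.splitOn line.toList (if delimiter = "" then "," else delimiter).toList) 0 0
  have hs : (if delimiter = "" then "," else delimiter).toList ≠ [] := by
    split
    · decide
    · rename_i hne
      intro hnil
      exact hne (by
        have := congrArg String.ofList hnil
        simpa using this)
  rw [splitOn_eq_splitRec _ _ hs, loop_eq _ _ hs _ 0 0 (by omega) (by omega)]
  simp
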